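-- pv_equiv track=rewrite | github.com/LittleRx/UDShunter | plugin/getEcuDid.py | character_pharse
-- ===== SOURCE A (Python) =====
-- def character_pharse(data):
--     newdata = ""
--     for i in data:
--         if i>0x1F and not 0x7A<i<0xA0:
--             newdata += bytes([i]).decode('latin')
--         else:
--             newdata += '*'
--     return newdata
-- ===== SOURCE B (Python) =====
-- # Run-length rewrite: scan maximal runs of the same keep-class, bulk-decode each
-- # kept run with one bytes(...).decode, emit a star block for each rejected run,
-- # then join the pieces (alternative decomposition; same value where A returns).
-- def character_pharse(data):
--     def keep(i):
--         return 0x1F < i <= 0x7A or 0xA0 <= i < 0x100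
--     pieces = []
--     j, n = 0, len(data)
--     while j < n:
--         p = keep(data[j])
--         k = j + 1
--         while k < n and keep(data[k]) == p:
--             k += 1
--         pieces.append(bytes(data[j:k]).decode('latin') if p else '*' * (k - j))
--         j = k
--     return ''.join(pieces)
-- ===== Notes on version B (the rewrite author's own statement) =====
-- stated objective: alternative
-- what changed: Replaces A's per-element branch-and-concatenate loop with a run-length scan: maximal runs of the same keep-class are found by an inner pointer, kept runs are bulk-decoded with one bytes().decode call, rejected runs become one star block, and the pieces are joined once.
import Mathlib
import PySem

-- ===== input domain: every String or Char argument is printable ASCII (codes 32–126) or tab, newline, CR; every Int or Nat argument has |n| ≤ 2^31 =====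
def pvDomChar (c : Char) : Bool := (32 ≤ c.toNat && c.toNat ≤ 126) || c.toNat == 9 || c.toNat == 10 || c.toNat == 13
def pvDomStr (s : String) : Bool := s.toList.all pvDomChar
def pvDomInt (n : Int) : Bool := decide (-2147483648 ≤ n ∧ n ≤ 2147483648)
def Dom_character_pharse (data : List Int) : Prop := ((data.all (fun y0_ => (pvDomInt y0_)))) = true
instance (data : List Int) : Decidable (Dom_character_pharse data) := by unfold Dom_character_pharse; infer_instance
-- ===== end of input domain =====

-- B replaces A's per-element branch-and-concatenate loop with a run-length scan:
-- maximal runs of the same keep-class are found, kept runs bulk-decoded, rejected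
-- runs emitted as star blocks, then the pieces are joined (alternative; same value on Pre_).


-- ===== PORT A =====
-- newdata starts as ""; each element appends either the latin-1 char of i or '*';
-- the string is carried as List Char, String.ofList at the end.
def character_pharse (data : List Int) : String :=
  String.ofList (data.foldl
    (fun acc i =>
      if i > 0x1F ∧ ¬ (0x7A < i ∧ i < 0xA0) then acc ++ [Char.ofNat i.toNat]
      else acc ++ ['*'])
    [])

-- ===== PORT B =====
-- keep(i) of Source B
def pvKeepB (i : Int) : Bool := (0x1F < i && i ≤ 0x7A) || (0xA0 ≤ i && i < 0x100)

-- the outer while loop of Source B: take the maximal run with the head's keep-class,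
-- emit one piece for it (bulk latin decode or a star block), recurse on the rest
def pvRunsB : List Int → List String
  | [] => []
  | x :: xs =>
    let p := pvKeepB x
    let run := x :: xs.takeWhile (fun i => pvKeepB i == p)
    let rest := xs.dropWhile (fun i => pvKeepB i == p)
    (if p then String.ofList (run.map (fun i => Char.ofNat i.toNat))
     else String.ofList (run.map (fun _ => '*'))) :: pvRunsB rest
termination_by l => l.length
decreasing_by
  simp only [List.length_cons]
  exact Nat.lt_succ_of_le (List.length_dropWhile_le _ _)

def character_pharse_alt (data : List Int) : String :=
  PySem.Str.join "" (pvRunsB data)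

-- ===== PRECONDITION & SPEC =====
-- A raises ValueError (bytes([i])) on any element above 255; those inputs are excluded.
def Pre_character_pharse (data : List Int) : Prop := ∀ i ∈ data, i ≤ 255
instance (data : List Int) : Decidable (Pre_character_pharse data) := by unfold Pre_character_pharse; infer_instance
def pvWitness_character_pharse : List Int := [0, 65, 122, 123, 160, 255, -5]

def Spec_character_pharse (data : List Int) (out : String) : Prop := out = character_pharse_alt data
instance (data : List Int) (out : String) : Decidable (Spec_character_pharse data out) := by unfold Spec_character_pharse; infer_instance

-- ===== CLAIM (what is proved, stated in full; the proofs are below) =====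
def Claim_equal_character_pharse : Prop := ∀ (data : List Int), Dom_character_pharse data → Pre_character_pharse data → Spec_character_pharse data (character_pharse data)

-- ===== LEMMAS AND PROOFS =====

-- the per-element character A produces
def pvCharOf (i : Int) : Char :=
  if i > 0x1F ∧ ¬ (0x7A < i ∧ i < 0xA0) then Char.ofNat i.toNat else '*'

lemma A_chars (data : List Int) (acc : List Char) :
    data.foldl
      (fun acc i =>
        if i > 0x1F ∧ ¬ (0x7A < i ∧ i < 0xA0) then acc ++ [Char.ofNat i.toNat]
        else acc ++ ['*'])
      acc = acc ++ data.map pvCharOf := by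
  induction data generalizing acc with
  | nil => simp
  | cons x xs ih =>
    simp only [List.foldl_cons, List.map_cons, ih, pvCharOf]
    split_ifs <;> simp_all

lemma charOf_of_keep (i : Int) (h : pvKeepB i = true) : pvCharOf i = Char.ofNat i.toNat := by
  unfold pvKeepB at h
  unfold pvCharOf
  rw [if_pos]
  simp only [Bool.or_eq_true, Bool.and_eq_true, decide_eq_true_eq] at h
  omega

lemma charOf_of_not_keep (i : Int) (hle : i ≤ 255) (h : pvKeepB i = false) : pvCharOf i = '*' := by
  unfold pvKeepB at h
  unfold pvCharOf
  rw [if_neg]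
  simp only [Bool.or_eq_false_iff, Bool.and_eq_false_iff, decide_eq_false_iff_not] at h
  omega

lemma chars_join_empty : ∀ l : List (List Char), PySem.Chars.join [] l = l.flatten
  | [] => by simp [PySem.Chars.join_nil]
  | [a] => by simp [PySem.Chars.join_singleton]
  | a :: b :: t => by
    rw [PySem.Chars.join_cons_cons]
    simp [chars_join_empty (b :: t)]

lemma runsB_flatten : ∀ xs : List Int, (∀ i ∈ xs, i ≤ 255) →
    ((pvRunsB xs).map String.toList).flatten = xs.map pvCharOf := by
  intro xs
  induction xs using pvRunsB.induct with
  | case1 => intro _; simp [pvRunsB]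
  | case2 x xs p rest ih =>
    set run : List Int := x :: xs.takeWhile (fun i => pvKeepB i == p) with hrun_def
    intro hle
    have hsplit : xs = xs.takeWhile (fun i => pvKeepB i == p) ++ xs.dropWhile (fun i => pvKeepB i == p) :=
      (List.takeWhile_append_dropWhile).symm
    have hrest : ∀ i ∈ rest, i ≤ 255 := by
      intro i hi
      refine hle i (List.mem_cons_of_mem x ?_)
      rw [hsplit]; exact List.mem_append_right _ hi
    have hx : pvKeepB x = p := rfl
    have hrun : run.map pvCharOf =
        (if p then run.map (fun i => Char.ofNat i.toNat) else run.map (fun _ => '*')) := by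
      by_cases hp : p = true
      · rw [if_pos hp]
        refine List.map_congr_left (fun i hi => ?_)
        rcases List.mem_cons.1 hi with h | h
        · subst h; exact charOf_of_keep _ (hx.trans hp)
        · have := List.mem_takeWhile_imp h
          simp only [beq_iff_eq] at this
          exact charOf_of_keep _ (this.trans hp)
      · have hp' : p = false := by simpa using hp
        rw [if_neg hp]
        refine List.map_congr_left (fun i hi => ?_)
        have hmem : i ∈ x :: xs := by
          rcases List.mem_cons.1 hi with h | h
          · subst h; exact List.mem_cons_self
          · exact List.mem_cons_of_mem x (List.takeWhile_subset _ h)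
        have hle' := hle i hmem
        rcases List.mem_cons.1 hi with h | h
        · subst h; exact charOf_of_not_keep _ hle' (hx.trans hp')
        · have := List.mem_takeWhile_imp h
          simp only [beq_iff_eq] at this
          exact charOf_of_not_keep _ hle' (this.trans hp')
    have hmap : (x :: xs).map pvCharOf = run.map pvCharOf ++ rest.map pvCharOf := by
      conv_lhs => rw [show (x :: xs) = run ++ rest from by
        simp only [run, rest, List.cons_append]
        exact congrArg (x :: ·) hsplit]
      exact List.map_append ..
    rw [pvRunsB]
    simp only [List.map_cons, List.flatten_cons, hmap, hrun, hx]
    rw [show List.dropWhile (fun i => pvKeepB i == p) xs = rest from rfl, ih hrest]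
    split_ifs <;> simp [String.toList_ofList, hrun_def]

-- ===== VERDICT (by name: the statement is the Claim_ definition above) =====
theorem character_pharse_spec : Claim_equal_character_pharse := by
  intro data _ hpre
  unfold Spec_character_pharse character_pharse character_pharse_alt
  apply String.toList_injective
  rw [String.toList_ofList, A_chars, List.nil_append, PySem.Str.toList_join]
  have h0 : ("" : String).toList = [] := rfl
  rw [h0, chars_join_empty]
  exact (runsB_flatten data hpre).symm
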